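-- pv_equiv track=rewrite | github.com/vlpha7/SubSyn | SubProcessServer/sub_process.py | extract_from_user_transcript
-- ===== SOURCE A (Python) =====
-- def extract_from_user_transcript(transcript):
--     if len(transcript) == 0:
--         return []
--     transcript = transcript.split('\n')
--     for i in range(0, len(transcript)-1):
--         transcript[i] += '\n'
--     result = []
--     for line in transcript:
--         line = line
--         line = line.split(' ')
--         for word in line:
--             result.append(word)
--     return result
-- ===== SOURCE B (Python) =====
-- def extract_from_user_transcript(transcript):
--     if len(transcript) == 0:
--         return []
--     result = []
--     token = ''
--     for ch in transcript:
--         if ch == ' ':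
--             result.append(token)
--             token = ''
--         elif ch == '\n':
--             result.append(token + '\n')
--             token = ''
--         else:
--             token += ch
--     result.append(token)
--     return result
-- ===== Notes on version B (the rewrite author's own statement) =====
-- stated objective: simpler
-- what changed: Replaced the split-on-newline / reattach-newline / split-each-line-on-space pipeline by a single character-level pass that maintains a token buffer, emitting it on ' ' and (with the newline attached) on ' '.
import Mathlib
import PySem

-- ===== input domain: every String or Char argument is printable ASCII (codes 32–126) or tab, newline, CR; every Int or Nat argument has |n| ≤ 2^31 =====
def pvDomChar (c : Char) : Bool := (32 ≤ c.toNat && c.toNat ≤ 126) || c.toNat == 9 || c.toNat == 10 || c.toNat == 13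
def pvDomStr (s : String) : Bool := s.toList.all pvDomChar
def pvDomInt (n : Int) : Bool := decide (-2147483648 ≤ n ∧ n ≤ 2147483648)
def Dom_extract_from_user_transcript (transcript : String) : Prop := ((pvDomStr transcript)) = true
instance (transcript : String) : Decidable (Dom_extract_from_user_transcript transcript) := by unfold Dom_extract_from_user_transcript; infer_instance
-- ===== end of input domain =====

-- B replaces A's split-on-'\n' / reattach-'\n' / split-each-line-on-' ' pipeline by one
-- character-level pass with a token buffer; objective: simpler (same result, same O(n) cost).

-- ===== PORT A =====
-- 'for i in range(0, len(transcript)-1): transcript[i] += "\n"': append '\n' to every element but the last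
def pvAttachNl : List (List Char) → List (List Char)
  | [] => []
  | [l] => [l]
  | l :: rest => (l ++ ['\n']) :: pvAttachNl rest

def extract_from_user_transcript (transcript : String) : List String :=
  if PySem.Str.len transcript = 0 then []
  else
    (pvAttachNl (PySem.Chars.splitOn transcript.toList ['\n'])).foldl
      (fun result line =>
        (PySem.Chars.splitOn line [' ']).foldl (fun r word => r ++ [String.ofList word]) result) []

-- ===== PORT B =====
def extract_from_user_transcript_alt (transcript : String) : List String :=
  if PySem.Str.len transcript = 0 then []
  else
    ((transcript.toList.foldl (fun (st : List String × List Char) ch =>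
        if ch = ' ' then (st.1 ++ [String.ofList st.2], [])
        else if ch = '\n' then (st.1 ++ [String.ofList (st.2 ++ ['\n'])], [])
        else (st.1, st.2 ++ [ch])) ([], [])).1)
    ++ [String.ofList ((transcript.toList.foldl (fun (st : List String × List Char) ch =>
        if ch = ' ' then (st.1 ++ [String.ofList st.2], [])
        else if ch = '\n' then (st.1 ++ [String.ofList (st.2 ++ ['\n'])], [])
        else (st.1, st.2 ++ [ch])) ([], [])).2)]

-- ===== PRECONDITION & SPEC =====
def Spec_extract_from_user_transcript (transcript : String) (out : List String) : Prop := out = extract_from_user_transcript_alt transcript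
instance (transcript : String) (out : List String) : Decidable (Spec_extract_from_user_transcript transcript out) := by unfold Spec_extract_from_user_transcript; infer_instance

-- ===== CLAIM (what is proved, stated in full; the proofs are below) =====
def Claim_equal_extract_from_user_transcript : Prop := ∀ (transcript : String), Dom_extract_from_user_transcript transcript → Spec_extract_from_user_transcript transcript (extract_from_user_transcript transcript)

-- ===== LEMMAS AND PROOFS =====

-- single-character split, accumulator `cur` held reversed (mirrors splitOn.go's state)
def pvSplitChar (k : Char) : List Char → List Char → List (List Char)
  | [], cur => [cur.reverse]
  | c :: rest, cur => if c = k then cur.reverse :: pvSplitChar k rest [] else pvSplitChar k rest (c :: cur)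

theorem pvGo_eq_splitChar (k : Char) (fuel : Nat) (l cur : List Char) (acc : List (List Char))
    (h : l.length ≤ fuel) :
    PySem.Chars.splitOn.go [k] fuel l cur acc = acc.reverse ++ pvSplitChar k l cur := by
  induction fuel generalizing l cur acc with
  | zero =>
      cases l with
      | nil => simp [PySem.Chars.splitOn.go, pvSplitChar]
      | cons c rest => simp at h
  | succ fuel ih =>
      cases l with
      | nil => simp [PySem.Chars.splitOn.go, pvSplitChar]
      | cons c rest =>
          rw [PySem.Chars.splitOn.go]
          have hlen : rest.length ≤ fuel := by
            simp only [List.length_cons] at h; omega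
          by_cases hk : c = k
          · subst hk
            rw [if_pos (by simp [List.isPrefixOf])]
            have hdrop : List.drop [c].length (c :: rest) = rest := rfl
            rw [hdrop, ih rest [] (cur.reverse :: acc) hlen]
            simp [pvSplitChar]
          · rw [if_neg (by simp [List.isPrefixOf]; exact fun hh => hk hh.symm)]
            rw [ih rest (c :: cur) acc hlen]
            simp [pvSplitChar, hk]

theorem pvSplitOn_single (k : Char) (l : List Char) :
    PySem.Chars.splitOn l [k] = pvSplitChar k l [] := by
  have := pvGo_eq_splitChar k (l.length + 1) l [] [] (Nat.le_succ _)
  simpa [PySem.Chars.splitOn] using this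

theorem pvSplitChar_ne_nil (k : Char) (l cur : List Char) : pvSplitChar k l cur ≠ [] := by
  induction l generalizing cur with
  | nil => simp [pvSplitChar]
  | cons c rest ih =>
      simp only [pvSplitChar]
      split
      · simp
      · exact ih _

-- a separator-free prefix is absorbed into the accumulator
theorem pvSplitChar_prefix (k : Char) (p l cur : List Char) (hp : k ∉ p) :
    pvSplitChar k (p ++ l) cur = pvSplitChar k l (p.reverse ++ cur) := by
  induction p generalizing cur with
  | nil => simp
  | cons c rest ih =>
      have hc : c ≠ k := fun h => hp (h ▸ List.mem_cons_self)
      have hr : k ∉ rest := fun h => hp (List.mem_cons_of_mem _ h)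
      simp [pvSplitChar, hc, ih _ hr]

theorem pvSplitChar_no_sep (k : Char) (l cur : List Char) (h : k ∉ l) :
    pvSplitChar k l cur = [cur.reverse ++ l] := by
  have := pvSplitChar_prefix k l [] cur h
  simpa [pvSplitChar] using this

-- the accumulator only prepends to the head piece
theorem pvSplitChar_cur (k : Char) (l cur : List Char) :
    pvSplitChar k l cur =
      (cur.reverse ++ (pvSplitChar k l []).headI) :: (pvSplitChar k l []).tail := by
  induction l generalizing cur with
  | nil => simp [pvSplitChar]
  | cons c rest ih =>
      by_cases hc : c = k
      · simp [pvSplitChar, hc]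
      · simp only [pvSplitChar, if_neg hc]
        rw [ih (c :: cur), ih [c]]
        simp

theorem pvNotMemSnoc (a c : Char) (l : List Char) (h1 : a ∉ l) (h2 : c ≠ a) : a ∉ l ++ [c] := by
  intro hmem
  rcases List.mem_append.mp hmem with hmem | hmem
  · exact h1 hmem
  · simp at hmem; exact h2 hmem.symm

-- A's result, character level
def pvAsem (cs : List Char) : List (List Char) :=
  (pvAttachNl (pvSplitChar '\n' cs [])).flatMap (fun line => pvSplitChar ' ' line [])

theorem pvAttachNl_cons (l : List Char) (t : List (List Char)) (ht : t ≠ []) :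
    pvAttachNl (l :: t) = (l ++ ['\n']) :: pvAttachNl t := by
  cases t with
  | nil => exact absurd rfl ht
  | cons y t' => rfl

theorem pvAsem_no_sep (buf : List Char) (hs : ' ' ∉ buf) (hn : '\n' ∉ buf) :
    pvAsem buf = [buf] := by
  simp [pvAsem, pvSplitChar_no_sep _ _ _ hn, pvAttachNl, pvSplitChar_no_sep _ _ _ hs]

theorem pvAsem_newline (buf cs : List Char) (hs : ' ' ∉ buf) (hn : '\n' ∉ buf) :
    pvAsem (buf ++ '\n' :: cs) = (buf ++ ['\n']) :: pvAsem cs := by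
  have h1 : pvSplitChar '\n' (buf ++ '\n' :: cs) [] = buf :: pvSplitChar '\n' cs [] := by
    rw [pvSplitChar_prefix '\n' buf ('\n' :: cs) [] hn]
    simp [pvSplitChar]
  have hsl : ' ' ∉ buf ++ ['\n'] := pvNotMemSnoc _ _ _ hs (by decide)
  rw [pvAsem, h1, pvAttachNl_cons _ _ (pvSplitChar_ne_nil _ _ _)]
  simp [pvAsem, pvSplitChar_no_sep _ _ _ hsl]

theorem pvAsem_space (buf cs : List Char) (hs : ' ' ∉ buf) (hn : '\n' ∉ buf) :
    pvAsem (buf ++ ' ' :: cs) = buf :: pvAsem cs := by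
  obtain ⟨H, T, hHT⟩ := List.exists_cons_of_ne_nil (pvSplitChar_ne_nil '\n' cs [])
  have h1 : pvSplitChar '\n' (buf ++ ' ' :: cs) [] = (buf ++ ' ' :: H) :: T := by
    rw [pvSplitChar_prefix '\n' buf (' ' :: cs) [] hn]
    simp only [pvSplitChar, if_neg (show (' ' : Char) ≠ '\n' by decide), List.append_nil]
    rw [pvSplitChar_cur '\n' cs (' ' :: buf.reverse), hHT]
    simp
  have hsp : ∀ l : List Char, pvSplitChar ' ' (buf ++ ' ' :: l) [] = buf :: pvSplitChar ' ' l [] := by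
    intro l
    rw [pvSplitChar_prefix ' ' buf (' ' :: l) [] hs]
    simp [pvSplitChar]
  cases T with
  | nil =>
      rw [pvAsem, h1, pvAsem, hHT]
      simp [pvAttachNl, hsp]
  | cons y T' =>
      rw [pvAsem, h1, pvAsem, hHT,
          pvAttachNl_cons (buf ++ ' ' :: H) (y :: T') (by simp),
          pvAttachNl_cons H (y :: T') (by simp)]
      simp only [List.flatMap_cons]
      rw [show (buf ++ ' ' :: H) ++ ['\n'] = buf ++ ' ' :: (H ++ ['\n']) by simp, hsp]
      simp

-- B's result, character level
def pvBl : List Char → List Char → List (List Char)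
  | [], buf => [buf]
  | c :: cs, buf =>
      if c = ' ' then buf :: pvBl cs []
      else if c = '\n' then (buf ++ ['\n']) :: pvBl cs []
      else pvBl cs (buf ++ [c])

theorem pvBl_eq_Asem (cs buf : List Char) (hs : ' ' ∉ buf) (hn : '\n' ∉ buf) :
    pvBl cs buf = pvAsem (buf ++ cs) := by
  induction cs generalizing buf with
  | nil => simp [pvBl, pvAsem_no_sep buf hs hn]
  | cons c rest ih =>
      by_cases hsp : c = ' '
      · subst hsp
        simp only [pvBl]
        rw [pvAsem_space buf rest hs hn, ih [] (by simp) (by simp)]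
        simp
      · by_cases hnl : c = '\n'
        · subst hnl
          have hne : ('\n' : Char) ≠ ' ' := by decide
          simp only [pvBl, if_neg hne]
          rw [pvAsem_newline buf rest hs hn, ih [] (by simp) (by simp)]
          simp
        · simp only [pvBl, if_neg hsp, if_neg hnl]
          rw [ih (buf ++ [c]) (pvNotMemSnoc _ _ _ hs hsp) (pvNotMemSnoc _ _ _ hn hnl)]
          simp

-- B's foldl with its pair state, related to pvBl
theorem pvFoldB (cs : List Char) (res : List String) (buf : List Char) :
    (cs.foldl (fun (st : List String × List Char) ch =>
        if ch = ' ' then (st.1 ++ [String.ofList st.2], [])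
        else if ch = '\n' then (st.1 ++ [String.ofList (st.2 ++ ['\n'])], [])
        else (st.1, st.2 ++ [ch])) (res, buf)).1
    ++ [String.ofList (cs.foldl (fun (st : List String × List Char) ch =>
        if ch = ' ' then (st.1 ++ [String.ofList st.2], [])
        else if ch = '\n' then (st.1 ++ [String.ofList (st.2 ++ ['\n'])], [])
        else (st.1, st.2 ++ [ch])) (res, buf)).2]
    = res ++ (pvBl cs buf).map String.ofList := by
  induction cs generalizing res buf with
  | nil => simp [pvBl]
  | cons c rest ih =>
      by_cases hsp : c = ' '
      · subst hsp
        simp only [List.foldl_cons]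
        rw [ih]
        simp [pvBl]
      · by_cases hnl : c = '\n'
        · subst hnl
          have hne : ('\n' : Char) ≠ ' ' := by decide
          simp only [List.foldl_cons, if_neg hne]
          rw [ih]
          simp [pvBl, hne]
        · simp only [List.foldl_cons, if_neg hsp, if_neg hnl]
          rw [ih]
          simp [pvBl, hsp, hnl]

-- A's foldl-of-foldl equals map String.ofList of pvAsem
theorem pvFoldA (cs : List Char) :
    (pvAttachNl (PySem.Chars.splitOn cs ['\n'])).foldl (fun result line =>
      (PySem.Chars.splitOn line [' ']).foldl (fun r word => r ++ [String.ofList word]) result) []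
    = (pvAsem cs).map String.ofList := by
  have hinner : ∀ (line : List Char) (res : List String),
      (PySem.Chars.splitOn line [' ']).foldl (fun r word => r ++ [String.ofList word]) res
        = res ++ (pvSplitChar ' ' line []).map String.ofList := by
    intro line res
    rw [pvSplitOn_single, PySem.List.foldl_append_singleton_eq_map]
  calc (pvAttachNl (PySem.Chars.splitOn cs ['\n'])).foldl (fun result line =>
        (PySem.Chars.splitOn line [' ']).foldl (fun r word => r ++ [String.ofList word]) result) []
      = (pvAttachNl (PySem.Chars.splitOn cs ['\n'])).foldl (fun result line =>
        result ++ (pvSplitChar ' ' line []).map String.ofList) [] := by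
        apply PySem.List.foldl_congr_mem
        intro acc x _
        exact hinner x acc
    _ = (pvAsem cs).map String.ofList := by
        rw [PySem.List.foldl_append_eq_flatMap, pvSplitOn_single]
        simp [pvAsem, List.map_flatMap]

-- ===== VERDICT (by name: the statement is the Claim_ definition above) =====
theorem extract_from_user_transcript_spec : Claim_equal_extract_from_user_transcript := by
  intro t _
  unfold Spec_extract_from_user_transcript
  unfold extract_from_user_transcript extract_from_user_transcript_alt
  split_ifs with h
  · rfl
  · rw [pvFoldA, pvFoldB t.toList [] [], pvBl_eq_Asem t.toList [] (by simp) (by simp)]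
    simp
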